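-- pv_equiv track=rewrite | github.com/yyuan29/python_llm | test_projects/project001/markdown_compiler/util/line_functions.py | compile_italic_underscore
-- ===== SOURCE A (Python) =====
-- def compile_italic_underscore(line):
--     '''
--     Convert "_italic_" into "<i>italic</i>".
--
--     HINT:
--     This function is almost exactly the same as `compile_italic_star`.
--
--     >>> compile_italic_underscore('_This is italic!_ This is not italic.')
--     '<i>This is italic!</i> This is not italic.'
--     >>> compile_italic_underscore('_This is italic!_')
--     '<i>This is italic!</i>'
--     >>> compile_italic_underscore('This is _italic_!')
--     'This is <i>italic</i>!'
--     >>> compile_italic_underscore('This is not _italic!')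
--     'This is not _italic!'
--     >>> compile_italic_underscore('_')
--     '_'
--     '''
--     result = ""
--     i = 0
--     while i < len(line):
--         if line[i:i + 1] == "_" and line.find("_", i + 1) != -1:
--             end = line.find("_", i + 1)
--             if end != -1:
--                 result += "<i>" + line[i + 1: end] + "</i>"
--                 i = end + 1
--             else:
--                 result += line[i]
--                 i += 1
--         else:
--             result += line[i]
--             i += 1
--
--     return result
-- ===== SOURCE B (Python) =====
-- def compile_italic_underscore(line):
--     # Split on '_' once and stitch consecutive part-pairs into <i>...</i>;
--     # a final unpaired part gets its underscore back literally.
--     parts = line.split('_')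
--     pieces = [parts[0]]
--     i = 1
--     while i < len(parts):
--         if i + 1 < len(parts):
--             pieces.append('<i>' + parts[i] + '</i>' + parts[i + 1])
--             i += 2
--         else:
--             pieces.append('_' + parts[i])
--             i += 1
--     return ''.join(pieces)
-- ===== Notes on version B (the rewrite author's own statement) =====
-- stated objective: faster
-- what changed: Replaced the index-by-index scan with repeated find calls and quadratic string concatenation by a single split on '_' followed by pairing consecutive parts into <i>...</i> (an odd leftover part keeps its underscore), joined once.
import Mathlib
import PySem

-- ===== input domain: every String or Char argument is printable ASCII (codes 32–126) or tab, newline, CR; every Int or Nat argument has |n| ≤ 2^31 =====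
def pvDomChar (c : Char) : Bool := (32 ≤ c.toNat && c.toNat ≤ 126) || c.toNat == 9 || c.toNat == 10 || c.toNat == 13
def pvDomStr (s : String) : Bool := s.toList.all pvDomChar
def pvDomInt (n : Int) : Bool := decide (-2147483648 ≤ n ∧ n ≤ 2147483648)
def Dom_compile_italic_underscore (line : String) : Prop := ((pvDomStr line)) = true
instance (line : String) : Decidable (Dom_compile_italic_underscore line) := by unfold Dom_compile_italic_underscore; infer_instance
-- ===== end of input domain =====

-- B replaces A's index scan (find-based) by one split on '_' plus pairing of consecutive parts; objective: simpler.

-- ===== PORT A =====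
-- the while loop of A: i is the scan position, result the accumulator
def compileGoA (s : List Char) (i : Nat) (result : List Char) : List Char :=
  if h : i < s.length then
    if PySem.Chars.slice s (some ((i : Nat) : Int)) (some ((i + 1 : Nat) : Int)) = ['_'] ∧
        PySem.Chars.findFrom s ['_'] ((i + 1 : Nat) : Int) ≠ -1 then
      if he : PySem.Chars.findFrom s ['_'] ((i + 1 : Nat) : Int) ≠ -1 then
        compileGoA s ((PySem.Chars.findFrom s ['_'] ((i + 1 : Nat) : Int)).toNat + 1)
          (result ++ ['<', 'i', '>'] ++
            PySem.Chars.slice s (some ((i + 1 : Nat) : Int))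
              (some (PySem.Chars.findFrom s ['_'] ((i + 1 : Nat) : Int))) ++ ['<', '/', 'i', '>'])
      else compileGoA s (i + 1) (result ++ [s[i]])
    else compileGoA s (i + 1) (result ++ [s[i]])
  else result
termination_by s.length - i
decreasing_by
  · have h1 := (PySem.Chars.findFrom_natCast_spec s ['_'] (i + 1) (by omega) he).1
    omega
  · omega
  · omega

def compile_italic_underscore (line : String) : String :=
  String.ofList (compileGoA line.toList 0 [])

-- ===== PORT B =====
-- ''.join over the parts after the first: consecutive pairs become <i>p</i>q, an odd leftover part gets '_' back
def altJoin : List (List Char) → List Char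
  | [] => []
  | [p] => '_' :: p
  | p :: q :: rest => ['<', 'i', '>'] ++ p ++ ['<', '/', 'i', '>'] ++ q ++ altJoin rest

def compile_italic_underscore_alt (line : String) : String :=
  match line.toList.splitOn '_' with
  | [] => ""   -- unreachable: split never returns an empty list
  | p :: rest => String.ofList (p ++ altJoin rest)

-- ===== PRECONDITION & SPEC =====
def Spec_compile_italic_underscore (line : String) (out : String) : Prop := out = compile_italic_underscore_alt line
instance (line : String) (out : String) : Decidable (Spec_compile_italic_underscore line out) := by unfold Spec_compile_italic_underscore; infer_instance

-- ===== CLAIM (what is proved, stated in full; the proofs are below) =====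
def Claim_equal_compile_italic_underscore : Prop := ∀ (line : String), Dom_compile_italic_underscore line → Spec_compile_italic_underscore line (compile_italic_underscore line)

-- ===== LEMMAS AND PROOFS =====

-- common reference recursion: scan char by char; on '_' with a later '_', wrap the span
def gfun : List Char → List Char
  | [] => []
  | c :: t =>
    if c = '_' ∧ '_' ∈ t then
      ['<', 'i', '>'] ++ t.takeWhile (· ≠ '_') ++ ['<', '/', 'i', '>'] ++
        gfun ((t.dropWhile (· ≠ '_')).tail)
    else c :: gfun t
termination_by l => l.length
decreasing_by
  · have h1 := List.length_dropWhile_le (fun c => decide (c ≠ '_')) t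
    have h2 := (t.dropWhile (· ≠ '_')).length_tail
    simp only [List.length_cons]
    omega
  · simp only [List.length_cons]; omega

lemma dropWhile_ne_nil_of_mem {t : List Char} (h : '_' ∈ t) :
    t.dropWhile (· ≠ '_') ≠ [] := by
  intro hnil
  have hall := List.dropWhile_eq_nil_iff.mp hnil '_' h
  simp at hall

lemma drop_takeWhile_len {t : List Char} :
    t.drop (t.takeWhile (· ≠ '_')).length = t.dropWhile (· ≠ '_') := by
  set tw := t.takeWhile (· ≠ '_') with htw
  set dw := t.dropWhile (· ≠ '_') with hdw
  have e : tw ++ dw = t := List.takeWhile_append_dropWhile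
  rw [← e]
  exact List.drop_left

-- Chars.find for the one-char needle points at the takeWhile boundary
lemma find_underscore {t : List Char} (h : '_' ∈ t) :
    PySem.Chars.find t ['_'] = ((t.takeWhile (· ≠ '_')).length : Int) := by
  have hinf : ['_'] <:+: t := (List.singleton_infix_iff '_' t).mpr h
  have hnn : 0 ≤ PySem.Chars.find t ['_'] := (PySem.Chars.find_nonneg_iff t ['_']).mpr hinf
  obtain ⟨hpre, hmin⟩ := PySem.Chars.find_spec hnn
  set n := (t.takeWhile (· ≠ '_')).length with hn
  have hne := dropWhile_ne_nil_of_mem h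
  have hcand : ['_'] <+: t.drop n := by
    rw [drop_takeWhile_len]
    obtain ⟨c, rest, hcr⟩ := List.exists_cons_of_ne_nil hne
    have hh := List.head?_dropWhile_not (fun c => decide (c ≠ '_')) t
    rw [hcr] at hh ⊢
    simp only [List.head?_cons] at hh
    have : c = '_' := by simpa using hh
    subst this
    exact ⟨rest, rfl⟩
  have hlt : ∀ i < n, ¬ ['_'] <+: t.drop i := by
    intro i hi hp
    have hil : i < t.length := lt_of_lt_of_le hi (by
      have := List.takeWhile_prefix (l := t) (· ≠ '_')
      exact this.length_le)
    have hhead : (t.drop i).head? = some '_' := by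
      obtain ⟨r, hr⟩ := hp
      rw [← hr]; rfl
    rw [List.head?_drop] at hhead
    have : t[i] = '_' := by
      have := List.getElem?_eq_getElem hil
      rw [this] at hhead; exact Option.some.inj hhead
    have hti : t[i] = (t.takeWhile (· ≠ '_'))[i]'(by omega) :=
      ((List.takeWhile_prefix (· ≠ '_')).getElem hi).symm
    have hmemtw : (t.takeWhile (· ≠ '_'))[i]'(by omega) ∈ t.takeWhile (· ≠ '_') :=
      List.getElem_mem _
    have hp' := List.mem_takeWhile_imp hmemtw
    rw [← hti, this] at hp'
    simp at hp'
  -- minimality on both sides forces equality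
  rcases lt_trichotomy (PySem.Chars.find t ['_']).toNat n with hlt' | heq | hgt
  · exact absurd hpre (hlt _ hlt')
  · omega
  · exact absurd hcand (hmin n hgt)

lemma splitOn_of_not_mem {t : List Char} (h : '_' ∉ t) : t.splitOn '_' = [t] := by
  induction t with
  | nil => rfl
  | cons c t ih =>
    simp only [List.mem_cons, not_or] at h
    simp only [List.splitOn, List.splitOnP_cons] at *
    rw [if_neg (by simpa using (Ne.symm h.1))]
    rw [ih h.2]
    rfl

lemma splitOn_of_mem {t : List Char} (h : '_' ∈ t) :
    t.splitOn '_' =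
      t.takeWhile (· ≠ '_') :: ((t.dropWhile (· ≠ '_')).tail).splitOn '_' := by
  induction t with
  | nil => cases h
  | cons c t ih =>
    by_cases hc : c = '_'
    · subst hc
      simp only [List.splitOn, List.splitOnP_cons]
      rw [if_pos (by simp)]
      simp [List.takeWhile, List.dropWhile]
    · have ht : '_' ∈ t := by
        rcases List.mem_cons.mp h with h1 | h1
        · exact absurd h1.symm hc
        · exact h1
      simp only [List.splitOn] at *
      rw [List.splitOnP_cons, if_neg (by simpa using hc)]
      rw [show List.takeWhile (· ≠ '_') (c :: t) = c :: t.takeWhile (· ≠ '_') by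
            simp [List.takeWhile, hc],
          show List.dropWhile (· ≠ '_') (c :: t) = t.dropWhile (· ≠ '_') by
            simp [List.dropWhile, hc]]
      rw [ih ht]
      rfl

lemma gfun_of_not_mem {t : List Char} (h : '_' ∉ t) : gfun t = t := by
  induction t with
  | nil => simp [gfun]
  | cons c t ih =>
    simp only [List.mem_cons, not_or] at h
    rw [gfun]
    rw [if_neg (by tauto)]
    rw [ih h.2]

-- B's split-and-pair computes gfun
lemma alt_eq_gfun : ∀ (cs : List Char),
    (match cs.splitOn '_' with
     | [] => []
     | p :: rest => p ++ altJoin rest) = gfun cs := by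
  intro cs
  induction hn : cs.length using Nat.strong_induction_on generalizing cs with
  | _ n ih =>
  subst hn
  match cs with
  | [] =>
    rw [show List.splitOn '_' ([] : List Char) = [[]] from rfl]
    simp [gfun, altJoin]
  | c :: t =>
    by_cases hc : c = '_'
    · subst hc
      by_cases hm : '_' ∈ t
      · rw [show ('_' :: t).splitOn '_' = [] :: t.splitOn '_' by
              simp [List.splitOn, List.splitOnP_cons]]
        rw [splitOn_of_mem hm]
        set t' := (t.dropWhile (· ≠ '_')).tail with ht'
        have hlen : t'.length < (('_' : Char) :: t).length := by
          have h1 := List.length_dropWhile_le (fun c => decide (c ≠ '_')) t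
          rw [ht']
          simp only [List.length_tail, List.length_cons]
          omega
        obtain ⟨q, rest', hqr⟩ := List.exists_cons_of_ne_nil
          (show t'.splitOn '_' ≠ [] from List.splitOnP_ne_nil _ _)
        rw [hqr]
        have ihv := ih t'.length hlen t' rfl
        rw [hqr] at ihv
        rw [gfun, if_pos ⟨rfl, hm⟩]
        simp only [altJoin, List.nil_append]
        rw [← ihv]
        simp
      · rw [show ('_' :: t).splitOn '_' = [] :: t.splitOn '_' by
              simp [List.splitOn, List.splitOnP_cons]]
        rw [splitOn_of_not_mem hm]
        rw [gfun, if_neg (by tauto)]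
        rw [gfun_of_not_mem hm]
        rfl
    · obtain ⟨p, rest, hpr⟩ := List.exists_cons_of_ne_nil
        (show t.splitOn '_' ≠ [] from List.splitOnP_ne_nil _ _)
      rw [show (c :: t).splitOn '_' = (c :: p) :: rest by
            simp only [List.splitOn, List.splitOnP_cons, if_neg (show ¬((c == '_') = true) by simpa using hc)]
            rw [show List.splitOnP (fun x => x == '_') t = p :: rest from hpr]
            rfl]
      rw [gfun, if_neg (by tauto)]
      have ihv := ih t.length (by simp) t rfl
      rw [hpr] at ihv
      rw [← ihv]
      rfl

-- A's scan from position i computes gfun of the remaining suffix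
lemma goA_eq_gfun : ∀ (s : List Char) (i : Nat) (acc : List Char),
    compileGoA s i acc = acc ++ gfun (s.drop i) := by
  intro s i acc
  induction hn : s.length - i using Nat.strong_induction_on generalizing i acc with
  | _ n ih =>
  subst hn
  by_cases h : i < s.length
  · have hdrop : s.drop i = s[i] :: s.drop (i + 1) := List.drop_eq_getElem_cons h
    have hslice : PySem.Chars.slice s (some ((i : Nat) : Int)) (some ((i + 1 : Nat) : Int))
        = [s[i]] := by
      rw [PySem.Chars.slice_eq_listSlice, PySem.List.slice_natCast]
      rw [show i + 1 - i = 1 by omega]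
      rw [hdrop]; rfl
    have hff := PySem.Chars.findFrom_natCast s ['_'] (i + 1) (by omega)
    have hmem_iff : PySem.Chars.find (s.drop (i + 1)) ['_'] = -1 ↔ '_' ∉ s.drop (i + 1) := by
      rw [PySem.Chars.find_eq_neg_one_iff, List.singleton_infix_iff]
    by_cases hcond : s[i] = '_' ∧ '_' ∈ s.drop (i + 1)
    · -- wrap branch
      set t := s.drop (i + 1) with htdef
      set nw := (t.takeWhile (· ≠ '_')).length with hnw
      have hfind : PySem.Chars.find t ['_'] = (nw : Int) := find_underscore hcond.2
      have heval : PySem.Chars.findFrom s ['_'] ((i + 1 : Nat) : Int) = ((i + 1 + nw : Nat) : Int) := by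
        rw [hff, if_neg (by rw [hfind]; omega), hfind]; push_cast; ring
      have htw_le : nw ≤ t.length := ((List.takeWhile_prefix (· ≠ '_')).length_le)
      rw [compileGoA]
      rw [dif_pos h, if_pos ⟨by rw [hslice, hcond.1], by rw [heval]; omega⟩,
        dif_pos (by rw [heval]; omega)]
      have htoNat : (PySem.Chars.findFrom s ['_'] ((i + 1 : Nat) : Int)).toNat = i + 1 + nw := by
        rw [heval]; omega
      have hslice2 : PySem.Chars.slice s (some ((i + 1 : Nat) : Int))
          (some (PySem.Chars.findFrom s ['_'] ((i + 1 : Nat) : Int)))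
          = t.takeWhile (· ≠ '_') := by
        rw [heval, PySem.Chars.slice_eq_listSlice]
        rw [show ((i + 1 + nw : Nat) : Int) = ((i + 1 : Nat) : Int) + (nw : Int) by push_cast; ring]
        rw [PySem.List.slice_natCast_add, ← htdef]
        exact ((List.prefix_iff_eq_take).mp (List.takeWhile_prefix _)).symm
      rw [hslice2, htoNat]
      have hdrop2 : s.drop (i + 1 + nw + 1) = (t.dropWhile (· ≠ '_')).tail := by
        rw [show i + 1 + nw + 1 = (i + 1) + (nw + 1) by omega, ← List.drop_drop, ← htdef,
          ← List.drop_drop, hnw, drop_takeWhile_len]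
        exact List.drop_one
      have hIH := ih (s.length - (i + 1 + nw + 1)) (by omega) (i + 1 + nw + 1)
        (acc ++ ['<', 'i', '>'] ++ t.takeWhile (· ≠ '_') ++ ['<', '/', 'i', '>']) rfl
      rw [hIH, hdrop2]
      rw [hdrop, gfun, if_pos ⟨hcond.1, hcond.2⟩]
      simp
    · -- copy branch
      have hstep : compileGoA s i acc = compileGoA s (i + 1) (acc ++ [s[i]]) := by
        rw [compileGoA, dif_pos h]
        by_cases hc1 : PySem.Chars.slice s (some ((i : Nat) : Int)) (some ((i + 1 : Nat) : Int)) = ['_'] ∧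
            PySem.Chars.findFrom s ['_'] ((i + 1 : Nat) : Int) ≠ -1
        · exfalso
          apply hcond
          constructor
          · rw [hslice] at hc1; exact List.singleton_inj.mp hc1.1
          · have := hc1.2
            rw [hff] at this
            by_cases hm : '_' ∈ s.drop (i + 1)
            · exact hm
            · rw [if_pos (hmem_iff.mpr hm)] at this; exact absurd rfl this
        · rw [if_neg hc1]
      rw [hstep, ih (s.length - (i + 1)) (by omega) (i + 1) (acc ++ [s[i]]) rfl]
      rw [hdrop, gfun, if_neg hcond]
      simp
  · rw [compileGoA, dif_neg h]
    rw [List.drop_eq_nil_of_le (by omega)]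
    simp [gfun]

-- ===== VERDICT (by name: the statement is the Claim_ definition above) =====
theorem compile_italic_underscore_spec : Claim_equal_compile_italic_underscore := by
  intro line _
  unfold Spec_compile_italic_underscore compile_italic_underscore compile_italic_underscore_alt
  obtain ⟨p, rest, hpr⟩ := List.exists_cons_of_ne_nil (List.splitOnP_ne_nil (fun x => x == '_') line.toList)
  rw [show line.toList.splitOn '_' = List.splitOnP (fun x => x == '_') line.toList from rfl, hpr]
  have hb := alt_eq_gfun line.toList
  rw [show line.toList.splitOn '_' = List.splitOnP (fun x => x == '_') line.toList from rfl, hpr] at hb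
  have ha := goA_eq_gfun line.toList 0 []
  simp only [List.drop_zero, List.nil_append] at ha
  rw [ha, ← hb]
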